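-- pv_equiv track=rewrite | github.com/Template-Latex/Template-Informe | utils.py | replace_argument
-- ===== SOURCE A (Python) =====
-- def replace_argument(line, argnum, new, arginitsep='{', argendsep='}'):
--     """
--     Reemplaza el argumento entre llaves de una determinada línea.
--
--     :param argendsep: Keyword al finalizar argumento
--     :param arginitsep: Keyword al iniciar argumento
--     :param new: Nuevos datos
--     :param line: Linea a reemplazar
--     :param argnum: Número del argumento
--     :return: String
--     """
--     if argnum < 1:
--         raise Exception('Numero de argumento invalido')
--     n = len(line)
--     c = False
--     ki = -1
--     ke = 0
--     a = []
--     for k in range(0, n):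
--         if line[k] is arginitsep and c is not True:
--             c = True
--             k += 1
--             ki = k
--             a.append([line[ke:ki], False])
--         elif line[k] is argendsep and c:
--             c = False
--             ke = k
--             k += 1
--             if ke < ki:
--                 raise Exception('Error al encontrar cierre parametro')
--             a.append([line[ki:ke], True])
--     a.append([line[ke:n], True])
--
--     d = 0
--     f = False
--     for k in range(0, len(a)):
--         if a[k][1]:
--             d += 1
--         if d == argnum:
--             a[k][0] = new
--             f = True
--             break
--     if not f:
--         raise Exception('No se encontro el numero de argumento')
--     z = ''
--     for k in a:
--         z += k[0]
--     return z
-- ===== SOURCE B (Python) =====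
-- def replace_argument(line, argnum, new, arginitsep='{', argendsep='}'):
--     """Single scan keeping only an argument counter and the content
--     boundaries (ki, ke); splices and returns as soon as the requested
--     argument closes, instead of building a segment list."""
--     if argnum < 1:
--         raise Exception('Numero de argumento invalido')
--     d = 0
--     inside = False
--     ki = 0
--     ke = 0
--     for k in range(len(line)):
--         if not inside and line[k] is arginitsep:
--             inside = True
--             ki = k + 1
--         elif inside and line[k] is argendsep:
--             if d + 1 == argnum:
--                 return line[:ki] + new + line[k:]
--             inside = False
--             d += 1
--             ke = k
--     if argnum == d + 1:
--         return (line[:ki] if inside else line[:ke]) + new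
--     raise Exception('No se encontro el numero de argumento')
-- ===== Notes on version B (the rewrite author's own statement) =====
-- stated objective: simpler
-- what changed: Instead of building a list of [text,is_argument] segments, mutating the Nth flagged one and re-concatenating, B keeps only an argument counter and the current brace-content boundaries (ki,ke) during one scan and splices line[:ki]+new+line[k:] the moment the requested argument closes (or line[:ki]/line[:ke]+new for the trailing pseudo-argument).
-- intended difference: When the scan ends inside an unmatched opening separator and argnum addresses one of the matched arguments, A's overlapping segment slices duplicate the text between the last closing and last opening separator (A('{a}b{c',1,'X') = '{X}b{}b{c'); B returns the clean splice '{X}b{c', which is the intended replacement; on the trailing pseudo-argument of such lines B matches A. — e.g. on replace_argument("{a}b{c", 1, "X", "{", "}"): A returns "{X}b{}b{c", B returns "{X}b{c"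
import Mathlib
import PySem

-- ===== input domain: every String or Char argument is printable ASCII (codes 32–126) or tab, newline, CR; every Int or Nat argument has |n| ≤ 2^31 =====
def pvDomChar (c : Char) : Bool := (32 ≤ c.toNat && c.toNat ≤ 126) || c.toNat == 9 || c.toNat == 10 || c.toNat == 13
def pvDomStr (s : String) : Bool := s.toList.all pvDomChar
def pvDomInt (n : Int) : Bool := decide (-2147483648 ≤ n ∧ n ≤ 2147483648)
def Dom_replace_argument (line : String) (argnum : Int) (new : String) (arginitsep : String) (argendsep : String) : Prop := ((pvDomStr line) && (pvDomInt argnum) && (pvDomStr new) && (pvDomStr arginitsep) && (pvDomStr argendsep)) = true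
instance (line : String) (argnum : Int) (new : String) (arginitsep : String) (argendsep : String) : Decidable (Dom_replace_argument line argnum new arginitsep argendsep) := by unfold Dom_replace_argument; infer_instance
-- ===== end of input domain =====

-- B replaces A's segment-list bookkeeping (build [text,flag] segments, mutate the Nth flagged
-- one, re-concatenate) by a single scan that keeps only an argument counter and the current
-- content boundaries and splices immediately: simpler, and it fixes A's duplicated output when
-- a matched argument is replaced on a line ending inside an unmatched opening separator (D_ below).


-- ===== PORT A =====
-- `line[k] is arginitsep`: on the ASCII domain a 1-char slice of `line` is the interned
-- 1-char string, so `is` holds iff the separator is that exact 1-char string; a separator of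
-- length ≠ 1 never matches.  Ported as `sep.data = [ch]`.
-- Python's `ki` starts at -1 but is only ever read after being assigned k+1 ≥ 0, so Nat with
-- initial 0 computes the same values.  `none` = the (unreachable) raise 'Error al encontrar
-- cierre parametro'; the other two raises ('argnum < 1', 'No se encontro') are outside Pre_.
def aLoop (cs : List Char) (iS eS : String) :
    List Char → Nat → Bool → Nat → Nat → List (List Char × Bool) →
    Option (Bool × Nat × Nat × List (List Char × Bool))
  | [], _, c, ki, ke, a => some (c, ki, ke, a)
  | ch :: r, k, c, ki, ke, a =>
    if iS.data = [ch] ∧ c = false then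
      -- c = True; k += 1; ki = k; a.append([line[ke:ki], False])
      aLoop cs iS eS r (k+1) true (k+1) ke (a ++ [((cs.drop ke).take (k+1 - ke), false)])
    else if eS.data = [ch] ∧ c = true then
      -- c = False; ke = k; k += 1; if ke < ki: raise; a.append([line[ki:ke], True])
      if k < ki then none
      else aLoop cs iS eS r (k+1) false ki k (a ++ [((cs.drop ki).take (k - ki), true)])
    else aLoop cs iS eS r (k+1) c ki ke a

-- second loop: d counter, replace the segment at which d reaches argnum (none = not found)
def ph2 (newL : List Char) (argnum : Int) :
    List (List Char × Bool) → Int → Option (List (List Char × Bool))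
  | [], _ => none
  | (s, b) :: r, d =>
    let d' := if b then d + 1 else d
    if d' = argnum then some ((newL, b) :: r)
    else (ph2 newL argnum r d').map (fun l => (s, b) :: l)

-- z = ''; for k in a: z += k[0]
def catF : List (List Char × Bool) → List Char → List Char
  | [], z => z
  | (s, _) :: r, z => catF r (z ++ s)

def replace_argument (line : String) (argnum : Int) (new : String) (arginitsep : String) (argendsep : String) : String :=
  if argnum < 1 then ""   -- raise Exception('Numero de argumento invalido'): outside Pre_
  else
    let cs := line.toList
    match aLoop cs arginitsep argendsep cs 0 false 0 0 [] with
    | none => ""           -- raise 'Error al encontrar cierre parametro' (never reached)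
    | some (_, _, ke, a0) =>
      let a := a0 ++ [((cs.drop ke).take (cs.length - ke), true)]   -- a.append([line[ke:n], True])
      match ph2 new.toList argnum a 0 with
      | none => ""         -- raise 'No se encontro el numero de argumento': outside Pre_
      | some l => String.ofList (catF l [])

-- ===== PORT B =====
def bLoop (cs : List Char) (iS eS : String) (newL : List Char) (argnum : Int) :
    List Char → Nat → Int → Bool → Nat → Nat → Option (List Char)
  | [], _, d, inside, ki, ke =>
    -- if argnum == d + 1: return (line[:ki] if inside else line[:ke]) + new
    if argnum = d + 1 then some ((if inside then cs.take ki else cs.take ke) ++ newL) else none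
  | ch :: r, k, d, inside, ki, ke =>
    if inside = false ∧ iS.data = [ch] then
      bLoop cs iS eS newL argnum r (k+1) d true (k+1) ke
    else if inside = true ∧ eS.data = [ch] then
      if d + 1 = argnum then some (cs.take ki ++ newL ++ cs.drop k)   -- line[:ki]+new+line[k:]
      else bLoop cs iS eS newL argnum r (k+1) (d+1) false ki k
    else bLoop cs iS eS newL argnum r (k+1) d inside ki ke

def replace_argument_alt (line : String) (argnum : Int) (new : String) (arginitsep : String) (argendsep : String) : String :=
  if argnum < 1 then ""   -- raise: outside Pre_
  else
    match bLoop line.toList arginitsep argendsep new.toList argnum line.toList 0 0 false 0 0 with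
    | some l => String.ofList l
    | none => ""           -- raise 'No se encontro el numero de argumento': outside Pre_

-- ===== PRECONDITION & SPEC =====
-- spec-side helper: one pass over the line with an (inside-an-argument?, finished-arguments)
-- pair as state; an argument starts at a character equal to the (1-character) arginitsep and
-- ends at the next character equal to argendsep.
def pvArgScan (arginitsep argendsep : String) (line : String) : Bool × Nat :=
  line.toList.foldl
    (fun st ch =>
      if st.1 = true then (if argendsep = String.ofList [ch] then (false, st.2 + 1) else st)
      else (if arginitsep = String.ofList [ch] then (true, st.2) else st))
    (false, 0)

-- Pre_ excludes exactly the raises of A: argnum < 1, and argnum beyond the number of matched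
-- pairs plus the one trailing pseudo-argument ('No se encontro el numero de argumento').
def Pre_replace_argument (line : String) (argnum : Int) (new : String) (arginitsep : String) (argendsep : String) : Prop :=
  1 ≤ argnum ∧ argnum ≤ ((pvArgScan arginitsep argendsep line).2 : Int) + 1
instance (line : String) (argnum : Int) (new : String) (arginitsep : String) (argendsep : String) : Decidable (Pre_replace_argument line argnum new arginitsep argendsep) := by unfold Pre_replace_argument; infer_instance

def pvWitness_replace_argument : String × Int × String × String × String := ("x{a}y", 1, "new", "{", "}")

-- On lines whose scan ends inside an unmatched opening separator and argnum addressing one of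
-- the MATCHED arguments, A's overlapping segment slices duplicate the text between the last
-- closing and the last opening separator (A "{a}b{c" 1 "X" = "{X}b{}b{c"); B returns the clean
-- splice "{X}b{c", which is the intended replacement.
def D_replace_argument (line : String) (argnum : Int) (new : String) (arginitsep : String) (argendsep : String) : Prop :=
  (pvArgScan arginitsep argendsep line).1 = true ∧ argnum ≤ ((pvArgScan arginitsep argendsep line).2 : Int)
instance (line : String) (argnum : Int) (new : String) (arginitsep : String) (argendsep : String) : Decidable (D_replace_argument line argnum new arginitsep argendsep) := by unfold D_replace_argument; infer_instance

def Spec_replace_argument (line : String) (argnum : Int) (new : String) (arginitsep : String) (argendsep : String) (out : String) : Prop := ¬ D_replace_argument line argnum new arginitsep argendsep → out = replace_argument_alt line argnum new arginitsep argendsep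
instance (line : String) (argnum : Int) (new : String) (arginitsep : String) (argendsep : String) (out : String) : Decidable (Spec_replace_argument line argnum new arginitsep argendsep out) := by unfold Spec_replace_argument; infer_instance

def pvDiffWitness_replace_argument : String × Int × String × String × String := ("{a}b{c", 1, "X", "{", "}")
def pvDiffWitnessOut_replace_argument : String × String := ("{X}b{}b{c", "{X}b{c")

-- ===== CLAIM (what is proved, stated in full; the proofs are below) =====
def Claim_unchanged_replace_argument : Prop := ∀ (line : String) (argnum : Int) (new : String) (arginitsep : String) (argendsep : String), Dom_replace_argument line argnum new arginitsep argendsep → Pre_replace_argument line argnum new arginitsep argendsep → Spec_replace_argument line argnum new arginitsep argendsep (replace_argument line argnum new arginitsep argendsep)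
def Claim_exact_replace_argument : Prop := ∀ (line : String) (argnum : Int) (new : String) (arginitsep : String) (argendsep : String), Dom_replace_argument line argnum new arginitsep argendsep → Pre_replace_argument line argnum new arginitsep argendsep → D_replace_argument line argnum new arginitsep argendsep → replace_argument line argnum new arginitsep argendsep ≠ replace_argument_alt line argnum new arginitsep argendsep
def Claim_changed_replace_argument : Prop := Dom_replace_argument (pvDiffWitness_replace_argument.1) (pvDiffWitness_replace_argument.2.1) (pvDiffWitness_replace_argument.2.2.1) (pvDiffWitness_replace_argument.2.2.2.1) (pvDiffWitness_replace_argument.2.2.2.2) ∧ Pre_replace_argument (pvDiffWitness_replace_argument.1) (pvDiffWitness_replace_argument.2.1) (pvDiffWitness_replace_argument.2.2.1) (pvDiffWitness_replace_argument.2.2.2.1) (pvDiffWitness_replace_argument.2.2.2.2) ∧ D_replace_argument (pvDiffWitness_replace_argument.1) (pvDiffWitness_replace_argument.2.1) (pvDiffWitness_replace_argument.2.2.1) (pvDiffWitness_replace_argument.2.2.2.1) (pvDiffWitness_replace_argument.2.2.2.2) ∧ replace_argument (pvDiffWitness_replace_argument.1) (pvDiffWitness_replace_argument.2.1) (pvDiffWitness_replace_argument.2.2.1)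 (pvDiffWitness_replace_argument.2.2.2.1) (pvDiffWitness_replace_argument.2.2.2.2) = pvDiffWitnessOut_replace_argument.1 ∧ replace_argument_alt (pvDiffWitness_replace_argument.1) (pvDiffWitness_replace_argument.2.1) (pvDiffWitness_replace_argument.2.2.1) (pvDiffWitness_replace_argument.2.2.2.1) (pvDiffWitness_replace_argument.2.2.2.2) = pvDiffWitnessOut_replace_argument.2 ∧ pvDiffWitnessOut_replace_argument.1 ≠ pvDiffWitnessOut_replace_argument.2

-- ===== LEMMAS AND PROOFS =====

-- proof-side unbundled forms of pvArgScan
def pvPairs (iS eS : String) : List Char → Bool → Nat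
  | [], _ => 0
  | ch :: r, c =>
    if iS.data = [ch] ∧ c = false then pvPairs iS eS r true
    else if eS.data = [ch] ∧ c = true then pvPairs iS eS r false + 1
    else pvPairs iS eS r c

-- spec-side scan: does the scan end inside an unmatched opening separator?
def pvHangs (iS eS : String) : List Char → Bool → Bool
  | [], c => c
  | ch :: r, c =>
    if iS.data = [ch] ∧ c = false then pvHangs iS eS r true
    else if eS.data = [ch] ∧ c = true then pvHangs iS eS r false
    else pvHangs iS eS r c

theorem pvArgScan_eq (iS eS : String) (cs : List Char) (c : Bool) (m : Nat) :
    cs.foldl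
      (fun st ch =>
        if st.1 = true then (if eS = String.ofList [ch] then (false, st.2 + 1) else st)
        else (if iS = String.ofList [ch] then (true, st.2) else st))
      (c, m) = (pvHangs iS eS cs c, m + pvPairs iS eS cs c) := by
  have hiff : ∀ (s : String) (ch : Char), (s = String.ofList [ch]) ↔ s.data = [ch] := by
    intro t ch
    constructor
    · intro h; rw [h]; show (String.ofList [ch]).toList = [ch]; simp
    · intro h; apply String.ext; simpa using h
  induction cs generalizing c m with
  | nil => simp [pvHangs, pvPairs]
  | cons ch r ih =>
    rw [List.foldl_cons]
    cases c with
    | false =>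
      by_cases h : iS.data = [ch]
      · rw [if_neg (by simp), if_pos ((hiff _ _).mpr h), ih]
        simp [pvHangs, pvPairs, h]
      · rw [if_neg (by simp), if_neg (fun hh => h ((hiff _ _).mp hh)), ih]
        simp [pvHangs, pvPairs, h]
    | true =>
      by_cases h : eS.data = [ch]
      · rw [if_pos rfl, if_pos ((hiff _ _).mpr h), ih]
        simp [pvHangs, pvPairs, h, Nat.add_assoc, Nat.add_comm 1]
      · rw [if_pos rfl, if_neg (fun hh => h ((hiff _ _).mp hh)), ih]
        simp [pvHangs, pvPairs, h]

-- A's final result, starting from a mid-scan state with empty accumulator and counter d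
def Afin (cs : List Char) (iS eS : String) (newL : List Char) (argnum : Int)
    (rest : List Char) (k : Nat) (c : Bool) (ki ke : Nat) (d : Int) : Option (List Char) :=
  (aLoop cs iS eS rest k c ki ke []).bind (fun t =>
    (ph2 newL argnum (t.2.2.2 ++ [((cs.drop t.2.2.1).take (cs.length - t.2.2.1), true)]) d).map
      (fun l => (l.map Prod.fst).flatten))

theorem catF_eq (l : List (List Char × Bool)) (z : List Char) :
    catF l z = z ++ (l.map Prod.fst).flatten := by
  induction l generalizing z with
  | nil => simp [catF]
  | cons h t ih => obtain ⟨s, b⟩ := h; simp [catF, ih]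

theorem aLoop_acc (cs : List Char) (iS eS : String) (rest : List Char)
    (k : Nat) (c : Bool) (ki ke : Nat) (acc : List (List Char × Bool)) :
    aLoop cs iS eS rest k c ki ke acc =
      (aLoop cs iS eS rest k c ki ke []).map
        (fun t => (t.1, t.2.1, t.2.2.1, acc ++ t.2.2.2)) := by
  induction rest generalizing k c ki ke acc with
  | nil => simp [aLoop]
  | cons ch r ih =>
    simp only [aLoop]
    split_ifs with h1 h2 h3
    · rw [ih (k+1) true (k+1) ke (acc ++ _), ih (k+1) true (k+1) ke ([] ++ _)]
      cases aLoop cs iS eS r (k+1) true (k+1) ke [] <;> simp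
    · rfl
    · rw [ih (k+1) false ki k (acc ++ _), ih (k+1) false ki k ([] ++ _)]
      cases aLoop cs iS eS r (k+1) false ki k [] <;> simp
    · exact ih _ _ _ _ _

theorem drop_take_drop (cs : List Char) (a b : Nat) (h : a ≤ b) :
    (cs.drop a).take (b - a) ++ cs.drop b = cs.drop a := by
  conv_rhs => rw [← List.take_append_drop (b - a) (cs.drop a)]
  rw [List.drop_drop, Nat.add_sub_cancel' h]

theorem take_take_drop (cs : List Char) (a b : Nat) (h : a ≤ b) :
    cs.take a ++ (cs.drop a).take (b - a) = cs.take b := by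
  rw [← List.take_add, Nat.add_sub_cancel' h]

-- reconstruction: from a non-hanging state, concatenating all produced segments plus the
-- trailing one yields the suffix of cs from the current position
theorem recon (cs : List Char) (iS eS : String) (rest : List Char)
    (k : Nat) (c : Bool) (ki ke : Nat)
    (hrest : rest = cs.drop k) (hke : ke ≤ k) (hki : c = true → ki ≤ k)
    (hng : pvHangs iS eS rest c = false) :
    ∃ c' ki' ke' segs, aLoop cs iS eS rest k c ki ke [] = some (c', ki', ke', segs) ∧
      ((segs ++ [((cs.drop ke').take (cs.length - ke'), true)]).map Prod.fst).flatten =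
        cs.drop (if c then ki else ke) := by
  induction rest generalizing k c ki ke with
  | nil =>
    simp only [pvHangs] at hng
    subst hng
    refine ⟨false, ki, ke, [], rfl, ?_⟩
    simp [← List.length_drop, List.take_length]
  | cons ch r ih =>
    have hnext : r = cs.drop (k + 1) := by rw [← List.tail_drop, ← hrest]; rfl
    simp only [pvHangs] at hng
    simp only [aLoop]
    by_cases h1 : iS.data = [ch] ∧ c = false
    · rw [if_pos h1] at hng ⊢
      obtain ⟨c', ki', ke', segs, hA, hF⟩ :=
        ih (k + 1) true (k + 1) ke hnext (Nat.le_succ_of_le hke) (fun _ => le_refl _) hng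
      rw [aLoop_acc, hA]
      refine ⟨c', ki', ke', _, rfl, ?_⟩
      simp only [if_pos] at hF
      rw [h1.2]
      simp only [List.nil_append, List.cons_append, List.map_cons, List.flatten_cons, hF]
      exact drop_take_drop cs ke (k + 1) (Nat.le_succ_of_le hke)
    · by_cases h2 : eS.data = [ch] ∧ c = true
      · rw [if_neg h1, if_pos h2] at hng ⊢
        rw [if_neg (show ¬ k < ki by have := hki h2.2; omega)]
        obtain ⟨c', ki', ke', segs, hA, hF⟩ :=
          ih (k + 1) false ki k hnext (Nat.le_succ k) (fun h => by cases h) hng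
        rw [aLoop_acc, hA]
        refine ⟨c', ki', ke', _, rfl, ?_⟩
        simp only [Bool.false_eq_true, if_false] at hF
        rw [h2.2]
        simp only [List.nil_append, List.cons_append, List.map_cons, List.flatten_cons, hF]
        exact drop_take_drop cs ki k (hki h2.2)
      · rw [if_neg h1, if_neg h2] at hng ⊢
        exact ih (k + 1) c ki ke hnext (Nat.le_succ_of_le hke)
          (fun h => Nat.le_succ_of_le (hki h)) hng

-- one non-replaced segment consed in front of A's remaining computation
theorem Afin_shift (cs : List Char) (iS eS : String) (newL : List Char) (argnum : Int)
    (rest : List Char) (k : Nat) (c : Bool) (ki ke : Nat) (d : Int) (x : List Char × Bool)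
    (hx : (if x.2 then d + 1 else d) ≠ argnum) :
    ((aLoop cs iS eS rest k c ki ke [x]).bind (fun t =>
      (ph2 newL argnum (t.2.2.2 ++ [((cs.drop t.2.2.1).take (cs.length - t.2.2.1), true)]) d).map
        (fun l => (l.map Prod.fst).flatten)))
    = (Afin cs iS eS newL argnum rest k c ki ke (if x.2 then d + 1 else d)).map
        (fun t => x.1 ++ t) := by
  rw [aLoop_acc]
  unfold Afin
  cases haL : aLoop cs iS eS rest k c ki ke [] with
  | none => simp
  | some t =>
    obtain ⟨s, b⟩ := x
    simp only [Option.map_some, Option.bind_some, List.cons_append, List.nil_append, ph2]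
    rw [if_neg hx]
    cases ph2 newL argnum
        (t.2.2.2 ++ [((cs.drop t.2.2.1).take (cs.length - t.2.2.1), true)])
        (if b then d + 1 else d) <;> simp

theorem main_lem (cs : List Char) (iS eS : String) (newL : List Char) (argnum : Int)
    (rest : List Char) (k : Nat) (c : Bool) (ki ke : Nat) (d : Int)
    (hrest : rest = cs.drop k) (hke : ke ≤ k) (hki : c = true → ki ≤ k)
    (hH : pvHangs iS eS rest c = false ∨
      (pvHangs iS eS rest c = true ∧ argnum = d + (pvPairs iS eS rest c : Int) + 1))
    (hd : d < argnum) :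
    bLoop cs iS eS newL argnum rest k d c ki ke =
      (Afin cs iS eS newL argnum rest k c ki ke d).map
        (fun t => cs.take (if c then ki else ke) ++ t) := by
  induction rest generalizing k c ki ke d with
  | nil =>
    simp only [pvHangs, pvPairs] at hH
    by_cases hq : argnum = d + 1
    · cases c with
      | false =>
        simp only [bLoop, Afin, aLoop, Option.bind_some, List.nil_append, ph2]
        simp [hq]
      | true =>
        simp only [bLoop, Afin, aLoop, Option.bind_some, List.nil_append, ph2]
        simp [hq]
    · -- argnum ≠ d+1: then c = false (a hanging end would force argnum = d+1)
      have hc : c = false := by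
        rcases hH with h | ⟨_, h⟩
        · exact h
        · exact absurd (by omega : argnum = d + 1) hq
      subst hc
      have hq' : ¬ d + 1 = argnum := fun h => hq h.symm
      simp only [bLoop, Afin, aLoop, Option.bind_some, List.nil_append, ph2]
      simp [hq, hq']
  | cons ch r ih =>
    have hnext : r = cs.drop (k + 1) := by rw [← List.tail_drop, ← hrest]; rfl
    simp only [pvHangs, pvPairs] at hH
    by_cases h1 : iS.data = [ch] ∧ c = false
    · -- opening separator
      simp only [if_pos h1] at hH
      have hB : bLoop cs iS eS newL argnum (ch :: r) k d c ki ke =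
          bLoop cs iS eS newL argnum r (k + 1) d true (k + 1) ke := by
        simp only [bLoop]; rw [if_pos ⟨h1.2, h1.1⟩]
      have hstep : Afin cs iS eS newL argnum (ch :: r) k c ki ke d =
          ((aLoop cs iS eS r (k + 1) true (k + 1) ke
              [((cs.drop ke).take (k + 1 - ke), false)]).bind (fun t =>
            (ph2 newL argnum
              (t.2.2.2 ++ [((cs.drop t.2.2.1).take (cs.length - t.2.2.1), true)]) d).map
              (fun l => (l.map Prod.fst).flatten))) := by
        unfold Afin; simp only [aLoop]; rw [if_pos h1]; simp only [List.nil_append]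
      have hsh := Afin_shift cs iS eS newL argnum r (k + 1) true (k + 1) ke d
        (((cs.drop ke).take (k + 1 - ke), false)) (by simpa using ne_of_lt hd)
      simp only [if_neg (by simp : ¬ (false = true))] at hsh
      rw [hB, hstep, hsh, ih (k + 1) true (k + 1) ke d hnext (Nat.le_succ_of_le hke)
        (fun _ => le_refl _) hH hd]
      cases Afin cs iS eS newL argnum r (k + 1) true (k + 1) ke d <;> simp [h1.2]
      rw [← List.append_assoc, take_take_drop cs ke (k + 1) (Nat.le_succ_of_le hke)]
    · by_cases h2 : eS.data = [ch] ∧ c = true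
      · -- closing separator
        simp only [if_neg h1, if_pos h2] at hH
        have hknoki : ¬ k < ki := by have := hki h2.2; omega
        have hstep : Afin cs iS eS newL argnum (ch :: r) k c ki ke d =
            ((aLoop cs iS eS r (k + 1) false ki k
                [((cs.drop ki).take (k - ki), true)]).bind (fun t =>
              (ph2 newL argnum
                (t.2.2.2 ++ [((cs.drop t.2.2.1).take (cs.length - t.2.2.1), true)]) d).map
                (fun l => (l.map Prod.fst).flatten))) := by
          unfold Afin; simp only [aLoop]
          rw [if_neg h1, if_pos h2, if_neg hknoki]; simp only [List.nil_append]
        by_cases hrep : d + 1 = argnum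
        · -- this is the replaced argument: both sides return the spliced line
          have hng : pvHangs iS eS r false = false := by
            rcases hH with h | ⟨_, h⟩
            · exact h
            · exact absurd h (by push_cast; omega)
          obtain ⟨c', ki', ke', segs, hAL, hF⟩ :=
            recon cs iS eS r (k + 1) false ki k hnext (Nat.le_succ k) (fun h => by cases h) hng
          simp only [Bool.false_eq_true, if_false] at hF
          have hB : bLoop cs iS eS newL argnum (ch :: r) k d c ki ke =
              some (cs.take ki ++ newL ++ cs.drop k) := by
            simp only [bLoop]
            rw [if_neg (by simp [h2.2]), if_pos ⟨h2.2, h2.1⟩, if_pos hrep]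
          have hA : Afin cs iS eS newL argnum (ch :: r) k c ki ke d =
              some (newL ++ cs.drop k) := by
            rw [hstep, aLoop_acc, hAL]
            simp only [Option.map_some, Option.bind_some, List.cons_append, List.nil_append, ph2]
            rw [if_pos (by simpa using hrep)]
            simp only [List.map_append, List.map_cons, List.map_nil, List.flatten_append,
              List.flatten_cons, List.flatten_nil, List.append_nil] at hF
            simp only [Option.map_some, List.map_cons, List.map_append, List.map_nil,
              List.flatten_cons, List.flatten_append, List.flatten_nil, List.append_nil]
            rw [hF]
          rw [hB, hA, h2.2]
          simp [List.append_assoc]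
        · have hB : bLoop cs iS eS newL argnum (ch :: r) k d c ki ke =
              bLoop cs iS eS newL argnum r (k + 1) (d + 1) false ki k := by
            simp only [bLoop]
            rw [if_neg (by simp [h2.2]), if_pos ⟨h2.2, h2.1⟩, if_neg hrep]
          have hsh := Afin_shift cs iS eS newL argnum r (k + 1) false ki k d
            (((cs.drop ki).take (k - ki), true)) (by simpa using hrep)
          simp only [reduceIte] at hsh
          have hH' : pvHangs iS eS r false = false ∨
              (pvHangs iS eS r false = true ∧
                argnum = (d + 1) + (pvPairs iS eS r false : Int) + 1) := by
            rcases hH with h | ⟨h, h'⟩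
            · exact Or.inl h
            · exact Or.inr ⟨h, by push_cast at h' ⊢; omega⟩
          rw [hB, hstep, hsh, ih (k + 1) false ki k (d + 1) hnext (Nat.le_succ k)
            (fun h => by cases h) hH' (by omega)]
          cases Afin cs iS eS newL argnum r (k + 1) false ki k (d + 1) <;> simp [h2.2]
          rw [← List.append_assoc, take_take_drop cs ki k (hki h2.2)]
      · simp only [if_neg h1, if_neg h2] at hH
        have hB : bLoop cs iS eS newL argnum (ch :: r) k d c ki ke =
            bLoop cs iS eS newL argnum r (k + 1) d c ki ke := by
          simp only [bLoop]
          rw [if_neg (fun h => h1 ⟨h.2, h.1⟩), if_neg (fun h => h2 ⟨h.2, h.1⟩)]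
        have hA : Afin cs iS eS newL argnum (ch :: r) k c ki ke d =
            Afin cs iS eS newL argnum r (k + 1) c ki ke d := by
          unfold Afin; simp only [aLoop]; rw [if_neg h1, if_neg h2]
        rw [hB, hA]
        exact ih (k + 1) c ki ke d hnext (Nat.le_succ_of_le hke)
          (fun h => Nat.le_succ_of_le (hki h)) hH hd


-- reconstruction for a HANGING scan: the produced segments cover cs[b:ki'] where ki' is the
-- position just after the last (unmatched) opening separator; ke' < ki' is the overlap A
-- later duplicates via the trailing segment cs[ke':]
theorem recon_hang (cs : List Char) (iS eS : String) (rest : List Char)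
    (k : Nat) (c : Bool) (ki ke : Nat)
    (hrest : rest = cs.drop k) (hke : ke ≤ k)
    (hki : c = true → ki ≤ k ∧ ke < ki ∧ ki ≤ cs.length) (hken : ke ≤ cs.length)
    (hng : pvHangs iS eS rest c = true) :
    ∃ ki' ke' segs, aLoop cs iS eS rest k c ki ke [] = some (true, ki', ke', segs) ∧
      (segs.map Prod.fst).flatten =
        (cs.drop (if c then ki else ke)).take (ki' - (if c then ki else ke)) ∧
      (if c then ki else ke) ≤ ki' ∧ ke' < ki' ∧ ki' ≤ cs.length := by
  induction rest generalizing k c ki ke with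
  | nil =>
    simp only [pvHangs] at hng
    subst hng
    obtain ⟨_, hkeki, hkin⟩ := hki rfl
    exact ⟨ki, ke, [], rfl, by simp, by simp, hkeki, hkin⟩
  | cons ch r ih =>
    have hnext : r = cs.drop (k + 1) := by rw [← List.tail_drop, ← hrest]; rfl
    have hklen : k < cs.length := by
      by_contra h
      rw [List.drop_eq_nil_of_le (by omega)] at hrest
      cases hrest
    simp only [pvHangs] at hng
    simp only [aLoop]
    by_cases h1 : iS.data = [ch] ∧ c = false
    · rw [if_pos h1] at hng ⊢
      obtain ⟨ki', ke', segs, hA, hF, hb, hke'ki', hki'n⟩ :=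
        ih (k + 1) true (k + 1) ke hnext (Nat.le_succ_of_le hke)
          (fun _ => ⟨le_refl _, by omega, by omega⟩) hken hng
      rw [aLoop_acc, hA]
      simp only [if_pos] at hF hb
      refine ⟨ki', ke', _, rfl, ?_, ?_, hke'ki', hki'n⟩
      · rw [h1.2]
        simp only [Bool.false_eq_true, if_false, List.nil_append, List.cons_append,
          List.map_cons, List.flatten_cons, hF]
        have hdd : cs.drop (k + 1) = (cs.drop ke).drop (k + 1 - ke) := by
          rw [List.drop_drop]; congr 1; omega
        rw [hdd, ← List.take_add,
          (by omega : k + 1 - ke + (ki' - (k + 1)) = ki' - ke)]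
      · rw [h1.2]; simp only [Bool.false_eq_true, if_false]; omega
    · by_cases h2 : eS.data = [ch] ∧ c = true
      · rw [if_neg h1, if_pos h2] at hng ⊢
        obtain ⟨hkik, hkeki, hkin⟩ := hki h2.2
        rw [if_neg (show ¬ k < ki by omega)]
        obtain ⟨ki', ke', segs, hA, hF, hb, hke'ki', hki'n⟩ :=
          ih (k + 1) false ki k hnext (Nat.le_succ k) (fun h => by cases h) (le_of_lt hklen) hng
        rw [aLoop_acc, hA]
        simp only [Bool.false_eq_true, if_false] at hF hb
        refine ⟨ki', ke', _, rfl, ?_, ?_, hke'ki', hki'n⟩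
        · rw [h2.2]
          simp only [reduceIte, List.nil_append, List.cons_append,
            List.map_cons, List.flatten_cons, hF]
          have hdd : cs.drop k = (cs.drop ki).drop (k - ki) := by
            rw [List.drop_drop]; congr 1; omega
          rw [hdd, ← List.take_add, (by omega : k - ki + (ki' - k) = ki' - ki)]
        · rw [h2.2]; simp only [reduceIte]; omega
      · rw [if_neg h1, if_neg h2] at hng ⊢
        exact ih (k + 1) c ki ke hnext (Nat.le_succ_of_le hke)
          (fun h => by have := hki h; omega) hken hng

-- inside D_: starting from a hanging state whose requested argument is a matched one, both
-- sides return, and A's result is strictly longer than B's (A duplicates cs[ke':ki'])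
theorem tight_lem (cs : List Char) (iS eS : String) (newL : List Char) (argnum : Int)
    (rest : List Char) (k : Nat) (c : Bool) (ki ke : Nat) (d : Int)
    (hrest : rest = cs.drop k) (hke : ke ≤ k)
    (hki : c = true → ki ≤ k ∧ ke < ki ∧ ki ≤ cs.length) (hken : ke ≤ cs.length)
    (hng : pvHangs iS eS rest c = true)
    (hd : d < argnum) (hcnt : argnum ≤ d + (pvPairs iS eS rest c : Int)) :
    ∃ la lb, bLoop cs iS eS newL argnum rest k d c ki ke = some lb ∧
      Afin cs iS eS newL argnum rest k c ki ke d = some la ∧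
      lb.length < (cs.take (if c then ki else ke)).length + la.length := by
  induction rest generalizing k c ki ke d with
  | nil =>
    simp only [pvPairs] at hcnt
    omega
  | cons ch r ih =>
    have hnext : r = cs.drop (k + 1) := by rw [← List.tail_drop, ← hrest]; rfl
    have hklen : k < cs.length := by
      by_contra h
      rw [List.drop_eq_nil_of_le (by omega)] at hrest
      cases hrest
    simp only [pvHangs, pvPairs] at hng hcnt
    by_cases h1 : iS.data = [ch] ∧ c = false
    · -- opening separator
      simp only [if_pos h1] at hng hcnt
      have hB : bLoop cs iS eS newL argnum (ch :: r) k d c ki ke =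
          bLoop cs iS eS newL argnum r (k + 1) d true (k + 1) ke := by
        simp only [bLoop]; rw [if_pos ⟨h1.2, h1.1⟩]
      have hstep : Afin cs iS eS newL argnum (ch :: r) k c ki ke d =
          ((aLoop cs iS eS r (k + 1) true (k + 1) ke
              [((cs.drop ke).take (k + 1 - ke), false)]).bind (fun t =>
            (ph2 newL argnum
              (t.2.2.2 ++ [((cs.drop t.2.2.1).take (cs.length - t.2.2.1), true)]) d).map
              (fun l => (l.map Prod.fst).flatten))) := by
        unfold Afin; simp only [aLoop]; rw [if_pos h1]; simp only [List.nil_append]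
      have hsh := Afin_shift cs iS eS newL argnum r (k + 1) true (k + 1) ke d
        (((cs.drop ke).take (k + 1 - ke), false)) (by simpa using ne_of_lt hd)
      simp only [if_neg (by simp : ¬ (false = true))] at hsh
      obtain ⟨la', lb, hBr, hAr, hlen⟩ :=
        ih (k + 1) true (k + 1) ke d hnext (Nat.le_succ_of_le hke)
          (fun _ => ⟨le_refl _, by omega, by omega⟩) hken hng hd hcnt
      refine ⟨(cs.drop ke).take (k + 1 - ke) ++ la', lb, by rw [hB, hBr], ?_, ?_⟩
      · rw [hstep, hsh, hAr]; rfl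
      · rw [h1.2]
        simp only [Bool.false_eq_true, if_false]
        simp only [if_pos] at hlen
        have hjoin := congrArg List.length (take_take_drop cs ke (k + 1) (by omega))
        simp only [List.length_append] at hjoin ⊢
        omega
    · by_cases h2 : eS.data = [ch] ∧ c = true
      · -- closing separator
        simp only [if_neg h1, if_pos h2] at hng hcnt
        obtain ⟨hkik, hkeki, hkin⟩ := hki h2.2
        have hknoki : ¬ k < ki := by omega
        have hstep : Afin cs iS eS newL argnum (ch :: r) k c ki ke d =
            ((aLoop cs iS eS r (k + 1) false ki k
                [((cs.drop ki).take (k - ki), true)]).bind (fun t =>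
              (ph2 newL argnum
                (t.2.2.2 ++ [((cs.drop t.2.2.1).take (cs.length - t.2.2.1), true)]) d).map
                (fun l => (l.map Prod.fst).flatten))) := by
          unfold Afin; simp only [aLoop]
          rw [if_neg h1, if_pos h2, if_neg hknoki]; simp only [List.nil_append]
        by_cases hrep : d + 1 = argnum
        · -- the replaced argument: B splices, A keeps the duplicated trailing segment
          obtain ⟨ki', ke', segs, hAL, hF, hb, hke'ki', hki'n⟩ :=
            recon_hang cs iS eS r (k + 1) false ki k hnext (Nat.le_succ k)
              (fun h => by cases h) (le_of_lt hklen) hng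
          simp only [Bool.false_eq_true, if_false] at hF hb
          have hB : bLoop cs iS eS newL argnum (ch :: r) k d c ki ke =
              some (cs.take ki ++ newL ++ cs.drop k) := by
            simp only [bLoop]
            rw [if_neg (by simp [h2.2]), if_pos ⟨h2.2, h2.1⟩, if_pos hrep]
          refine ⟨newL ++ (segs.map Prod.fst).flatten ++
              (cs.drop ke').take (cs.length - ke'), _, hB, ?_, ?_⟩
          · rw [hstep, aLoop_acc, hAL]
            simp only [Option.map_some, Option.bind_some, List.cons_append, List.nil_append, ph2]
            rw [if_pos (by simpa using hrep)]
            simp only [Option.map_some, List.map_cons, List.map_append, List.map_nil,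
              List.flatten_cons, List.flatten_append, List.flatten_nil, List.append_nil]
            rw [List.append_assoc]
          · rw [h2.2, hF]
            simp only [if_pos, List.length_append, List.length_take, List.length_drop]
            omega
        · have hB : bLoop cs iS eS newL argnum (ch :: r) k d c ki ke =
              bLoop cs iS eS newL argnum r (k + 1) (d + 1) false ki k := by
            simp only [bLoop]
            rw [if_neg (by simp [h2.2]), if_pos ⟨h2.2, h2.1⟩, if_neg hrep]
          have hsh := Afin_shift cs iS eS newL argnum r (k + 1) false ki k d
            (((cs.drop ki).take (k - ki), true)) (by simpa using hrep)
          simp only [reduceIte] at hsh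
          obtain ⟨la', lb, hBr, hAr, hlen⟩ :=
            ih (k + 1) false ki k (d + 1) hnext (Nat.le_succ k) (fun h => by cases h)
              (le_of_lt hklen) hng (by omega) (by push_cast at hcnt ⊢; omega)
          refine ⟨(cs.drop ki).take (k - ki) ++ la', lb, by rw [hB, hBr], ?_, ?_⟩
          · rw [hstep, hsh, hAr]; rfl
          · rw [h2.2]
            simp only [Bool.false_eq_true, if_false] at hlen
            simp only [if_pos]
            have hjoin := congrArg List.length (take_take_drop cs ki k hkik)
            simp only [List.length_append] at hjoin ⊢
            omega
      · simp only [if_neg h1, if_neg h2] at hng hcnt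
        have hB : bLoop cs iS eS newL argnum (ch :: r) k d c ki ke =
            bLoop cs iS eS newL argnum r (k + 1) d c ki ke := by
          simp only [bLoop]
          rw [if_neg (fun h => h1 ⟨h.2, h.1⟩), if_neg (fun h => h2 ⟨h.2, h.1⟩)]
        have hA : Afin cs iS eS newL argnum (ch :: r) k c ki ke d =
            Afin cs iS eS newL argnum r (k + 1) c ki ke d := by
          unfold Afin; simp only [aLoop]; rw [if_neg h1, if_neg h2]
        rw [hB, hA]
        exact ih (k + 1) c ki ke d hnext (Nat.le_succ_of_le hke)
          (fun h => by have := hki h; omega) hken hng hd hcnt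

-- ===== VERDICT (by name: the statement is the Claim_ definition above) =====
theorem replace_argument_spec : Claim_unchanged_replace_argument := by
  intro line argnum new iS eS hdom hpre hnd
  unfold Pre_replace_argument pvArgScan at hpre
  unfold D_replace_argument pvArgScan at hnd
  rw [pvArgScan_eq] at hpre hnd
  simp only [Nat.zero_add] at hpre hnd
  obtain ⟨hp1, hp2⟩ := hpre
  have hH : pvHangs iS eS line.toList false = false ∨
      (pvHangs iS eS line.toList false = true ∧
        argnum = 0 + (pvPairs iS eS line.toList false : Int) + 1) := by
    cases h : pvHangs iS eS line.toList false with
    | false => exact Or.inl rfl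
    | true =>
      refine Or.inr ⟨rfl, ?_⟩
      rw [h] at hnd
      have : ¬ argnum ≤ (pvPairs iS eS line.toList false : Int) := fun hle => hnd ⟨rfl, hle⟩
      omega
  have hm := main_lem line.toList iS eS new.toList argnum line.toList 0 false 0 0 0 rfl
    (le_refl 0) (fun h => by cases h) hH (by omega)
  unfold Afin at hm
  unfold replace_argument replace_argument_alt
  rw [if_neg (by omega : ¬ argnum < 1), if_neg (by omega : ¬ argnum < 1)]
  dsimp only
  cases hA : aLoop line.toList iS eS line.toList 0 false 0 0 [] with
  | none =>
    rw [hA] at hm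
    simp only [Option.bind_none, Option.map_none] at hm
    rw [hm]
  | some t =>
    obtain ⟨c', ki', ke', segs⟩ := t
    rw [hA] at hm
    simp only [Option.bind_some, List.take_zero, List.nil_append, Bool.false_eq_true,
      if_false, Option.map_map] at hm
    dsimp only
    cases hP : ph2 new.toList argnum
        (segs ++ [((line.toList.drop ke').take (line.toList.length - ke'), true)]) 0 with
    | none =>
      rw [hP] at hm
      simp only [Option.map_none] at hm
      rw [hm]
    | some l =>
      rw [hP] at hm
      simp only [Option.map_some] at hm
      rw [hm]
      simp [catF_eq]

theorem replace_argument_changed : Claim_changed_replace_argument := by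
  unfold Claim_changed_replace_argument; decide

theorem replace_argument_tight : Claim_exact_replace_argument := by
  intro line argnum new iS eS hdom hpre hD
  unfold Pre_replace_argument pvArgScan at hpre
  unfold D_replace_argument pvArgScan at hD
  rw [pvArgScan_eq] at hpre hD
  simp only [Nat.zero_add] at hpre hD
  obtain ⟨hp1, _⟩ := hpre
  obtain ⟨hng, hcnt⟩ := hD
  obtain ⟨la, lb, hB, hA, hlen⟩ :=
    tight_lem line.toList iS eS new.toList argnum line.toList 0 false 0 0 0 rfl
      (le_refl 0) (fun h => by cases h) (Nat.zero_le _) hng (by omega) (by omega)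
  unfold Afin at hA
  intro hEq
  unfold replace_argument replace_argument_alt at hEq
  rw [if_neg (by omega : ¬ argnum < 1), if_neg (by omega : ¬ argnum < 1)] at hEq
  dsimp only at hEq
  cases hAL : aLoop line.toList iS eS line.toList 0 false 0 0 [] with
  | none => rw [hAL] at hA; simp at hA
  | some t =>
    obtain ⟨c', ki', ke', segs⟩ := t
    rw [hAL] at hA hEq
    dsimp only at hEq
    simp only [Option.bind_some] at hA
    cases hP : ph2 new.toList argnum
        (segs ++ [((line.toList.drop ke').take (line.toList.length - ke'), true)]) 0 with
    | none => rw [hP] at hA; simp at hA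
    | some l =>
      rw [hP] at hA hEq
      dsimp only at hEq
      simp only [Option.map_some, Option.some_inj] at hA
      rw [hB] at hEq
      dsimp only at hEq
      have hlists : catF l [] = lb := by
        have h2 := congrArg String.toList hEq
        simpa using h2
      rw [catF_eq, List.nil_append, hA] at hlists
      have := congrArg List.length hlists
      simp at hlen
      omega
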